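-- pv_equiv track=rewrite | github.com/sanjaykumaravel-max/sms_alert_system | src/machine_alert_runner.py | _machine_open_task_days
-- ===== SOURCE A (Python) =====
-- from typing import Any, Dict, Iterable, List, Optional
--
-- def _to_int(value: Any, default: int = 0) -> int:
--     try:
--         return int(float(str(value).strip()))
--     except Exception:
--         return int(default)
--
-- def _machine_open_task_days(tasks: List[Dict[str, Any]]) -> Dict[str, int]:
--     out: Dict[str, int] = {}
--     for task in tasks or []:
--         machine_id = str(task.get("machine_id") or "").strip()
--         if not machine_id:
--             continue
--         days_open = _to_int(task.get("_days_open"), 0)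
--         out[machine_id] = max(days_open, out.get(machine_id, 0))
--     return out
-- ===== SOURCE B (Python) =====
-- from typing import Any, Dict, List
--
--
-- def _to_int(value: Any, default: int = 0) -> int:
--     try:
--         return int(float(str(value).strip()))
--     except Exception:
--         return int(default)
--
--
-- def _machine_open_task_days(tasks: List[Dict[str, Any]]) -> Dict[str, int]:
--     # pass 1: collect all (machine_id, converted days) pairs that A would process
--     pairs = [(mid, _to_int(task.get("_days_open"), 0))
--              for task in (tasks or [])
--              if (mid := str(task.get("machine_id") or "").strip())]
--     # pass 2: distinct machine ids in first-occurrence order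
--     order = list(dict.fromkeys(m for m, _ in pairs))
--     # pass 3: per machine, the 0-floored maximum of its collected values
--     return {mid: max([0] + [d for m, d in pairs if m == mid]) for mid in order}
-- ===== Notes on version B (the rewrite author's own statement) =====
-- stated objective: alternative
-- what changed: B keeps no dictionary state at all: it materialises the (machine_id, days) pair list, takes the distinct machine ids in first-occurrence order via dict.fromkeys, and computes each machine's 0-floored maximum by a per-key scan of the pair list, instead of A's single running-max dict loop.
import Mathlib
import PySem

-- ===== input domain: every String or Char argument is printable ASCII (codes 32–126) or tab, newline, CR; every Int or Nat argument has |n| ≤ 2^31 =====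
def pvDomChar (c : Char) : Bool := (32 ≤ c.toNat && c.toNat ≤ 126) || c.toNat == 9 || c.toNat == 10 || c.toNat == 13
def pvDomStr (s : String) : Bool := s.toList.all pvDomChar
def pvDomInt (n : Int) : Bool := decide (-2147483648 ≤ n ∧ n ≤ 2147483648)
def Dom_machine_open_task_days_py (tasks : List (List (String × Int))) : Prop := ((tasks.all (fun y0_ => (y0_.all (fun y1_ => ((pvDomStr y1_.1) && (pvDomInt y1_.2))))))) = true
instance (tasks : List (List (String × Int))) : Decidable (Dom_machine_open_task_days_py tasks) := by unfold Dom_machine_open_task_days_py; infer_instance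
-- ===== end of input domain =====

-- B keeps no dictionary state: it collects the processed (machine_id, days) pairs, dedups the
-- ids in first-occurrence order, and computes each machine's 0-floored maximum by a per-id scan
-- of the pair list (objective: alternative; same result, different decomposition).

-- ===== PORT A =====
-- helper _to_int (shared by both Pythons): int(float(str(value).strip())).
-- For an int value this is the identity — str(n) has no whitespace and float is exact for
-- |n| ≤ 2^31 ≪ 2^53, so int(float(str(n))) = n on the stated domain; for None, float("None")
-- raises and the default is returned.  Exact on the stated domain.
def to_int_py (value : Option Int) (default : Int) : Int :=
  match value with
  | some n => n
  | none => default

-- str(x or ""): None and 0 are falsy → ""; otherwise str of the int (exact)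
def or_empty_str (x : Option Int) : String :=
  match x with
  | some n => if n == 0 then "" else PySem.Int.toStr n
  | none => ""

def machine_open_task_days_py (tasks : List (List (String × Int))) : List (String × Int) :=
  (tasks.foldl (fun out task =>
      let machine_id := PySem.Str.strip (or_empty_str ((PySem.Dict.mk task).get? "machine_id"))
      if machine_id == "" then out
      else
        let days_open := to_int_py ((PySem.Dict.mk task).get? "_days_open") 0
        out.insert machine_id (max days_open (out.getD machine_id 0)))
    PySem.Dict.empty).items

-- ===== PORT B =====
def machine_open_task_days_py_alt (tasks : List (List (String × Int))) : List (String × Int) :=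
  -- pass 1: the pair-list comprehension
  let pairs := tasks.filterMap (fun task =>
    let mid := PySem.Str.strip (or_empty_str ((PySem.Dict.mk task).get? "machine_id"))
    if mid == "" then none
    else some (mid, to_int_py ((PySem.Dict.mk task).get? "_days_open") 0))
  -- pass 2: list(dict.fromkeys(...)) = first occurrences in order
  let order := PySem.List.dedup (pairs.map Prod.fst)
  -- pass 3: {mid: max([0] + [d for m, d in pairs if m == mid]) for mid in order}
  order.map (fun mid => (mid, ((pairs.filter (fun p => p.1 == mid)).map Prod.snd).foldl max 0))

-- ===== PRECONDITION & SPEC =====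
def Spec_machine_open_task_days_py (tasks : List (List (String × Int))) (out : List (String × Int)) : Prop := out = machine_open_task_days_py_alt tasks
instance (tasks : List (List (String × Int))) (out : List (String × Int)) : Decidable (Spec_machine_open_task_days_py tasks out) := by unfold Spec_machine_open_task_days_py; infer_instance

-- ===== CLAIM (what is proved, stated in full; the proofs are below) =====
def Claim_equal_machine_open_task_days_py : Prop := ∀ (tasks : List (List (String × Int))), Dom_machine_open_task_days_py tasks → Spec_machine_open_task_days_py tasks (machine_open_task_days_py tasks)

-- ===== LEMMAS AND PROOFS =====

-- the (machine_id, converted days) pairs A's loop actually processes, in order (= B's pass 1)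
def pvPairs (tasks : List (List (String × Int))) : List (String × Int) :=
  tasks.filterMap (fun task =>
    let mid := PySem.Str.strip (or_empty_str ((PySem.Dict.mk task).get? "machine_id"))
    if mid == "" then none
    else some (mid, to_int_py ((PySem.Dict.mk task).get? "_days_open") 0))

-- A's skip-or-update loop over tasks is the plain update loop over its processed pairs
lemma A_foldl (tasks : List (List (String × Int))) (d : PySem.Dict String Int) :
    tasks.foldl (fun out task =>
      let machine_id := PySem.Str.strip (or_empty_str ((PySem.Dict.mk task).get? "machine_id"))
      if machine_id == "" then out
      else
        let days_open := to_int_py ((PySem.Dict.mk task).get? "_days_open") 0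
        out.insert machine_id (max days_open (out.getD machine_id 0))) d
    = (pvPairs tasks).foldl (fun out p => out.insert p.1 (max p.2 (out.getD p.1 0))) d := by
  induction tasks generalizing d with
  | nil => rfl
  | cons t ts ih =>
    simp only [List.foldl_cons]
    rw [ih]
    by_cases h : PySem.Str.strip (or_empty_str ((PySem.Dict.mk t).get? "machine_id")) = ""
    · simp [pvPairs, h]
    · simp [pvPairs, h]

-- A's running max at key c, expressed through the filtered values
lemma getD_foldl_insert_max (l : List (String × Int)) (d : PySem.Dict String Int) (c : String) :
    (l.foldl (fun out p => out.insert p.1 (max p.2 (out.getD p.1 0))) d).getD c 0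
    = ((l.filter (fun p => p.1 == c)).map (·.2)).foldl max (d.getD c 0) := by
  induction l generalizing d with
  | nil => rfl
  | cons p t ih =>
    simp only [List.foldl_cons, List.filter_cons]
    rw [ih, PySem.Dict.getD_insert]
    by_cases h : p.1 = c
    · subst h
      simp [max_comm]
    · have h' : ¬ c = p.1 := fun hc => h hc.symm
      simp [h, h']

lemma keys_A (l : List (String × Int)) :
    (l.foldl (fun out p => out.insert p.1 (max p.2 (out.getD p.1 0))) (PySem.Dict.empty : PySem.Dict String Int)).keys.Nodup ∧
    (l.foldl (fun out p => out.insert p.1 (max p.2 (out.getD p.1 0))) (PySem.Dict.empty : PySem.Dict String Int)).keys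
      = PySem.Set.ofList (l.map Prod.fst) := by
  refine ⟨PySem.Dict.nodup_keys_foldl_insert_key l Prod.fst _ _ PySem.Dict.nodup_keys_empty, ?_⟩
  rw [PySem.Dict.keys_foldl_insert_key]
  simp [PySem.Set.update_nil_left, PySem.Dict.keys_empty]

lemma A_eq (tasks : List (List (String × Int))) :
    machine_open_task_days_py tasks
    = ((pvPairs tasks).foldl (fun out p => out.insert p.1 (max p.2 (out.getD p.1 0))) PySem.Dict.empty).items := by
  unfold machine_open_task_days_py
  rw [A_foldl]

lemma B_eq (tasks : List (List (String × Int))) :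
    machine_open_task_days_py_alt tasks
    = (PySem.List.dedup ((pvPairs tasks).map Prod.fst)).map
        (fun mid => (mid, (((pvPairs tasks).filter (fun p => p.1 == mid)).map Prod.snd).foldl max 0)) := rfl

-- ===== VERDICT (by name: the statement is the Claim_ definition above) =====
theorem machine_open_task_days_py_spec : Claim_equal_machine_open_task_days_py := by
  intro tasks _
  unfold Spec_machine_open_task_days_py
  rw [A_eq, B_eq]
  set l := pvPairs tasks with hl
  obtain ⟨hAnd, hAkeys⟩ := keys_A l
  rw [PySem.Dict.items_eq_map_keys _ hAnd 0, hAkeys]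
  rw [PySem.List.dedup_eq_ofList]
  apply List.map_congr_left
  intro k _
  rw [getD_foldl_insert_max]
  simp [PySem.Dict.getD_empty]
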